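-- pv_equiv track=rewrite | github.com/grp2002/portofolio | Internship/Cyprus Post Route Optimization/stopTimes/calculation.py | find_best_matching_route
-- ===== SOURCE A (Python) =====
-- def find_best_matching_route(route_map, optebox_ids):
--     best_match = None
--     max_matches = 0
--     missing_boxes = set()
--
--     all_route_boxes = set()
--
--     unmatched_boxes = optebox_ids - all_route_boxes
--
--     for route, ids in route_map.items():
--         matches = len(set(ids) & optebox_ids)
--         if matches > max_matches:
--             max_matches = matches
--             best_match = route
--             missing_boxes = set(ids) - optebox_ids
--             unmatched_boxes = optebox_ids - set(ids)
--     return best_match, missing_boxes, unmatched_boxes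
-- ===== SOURCE B (Python) =====
-- def find_best_matching_route(route_map, optebox_ids):
--     # Build an inverted index: box id -> set of routes whose id list contains it.
--     index = {}
--     for route, ids in route_map.items():
--         for bid in set(ids):
--             index.setdefault(bid, set()).add(route)
--     # Tally matches per route by scanning optebox_ids once through the index.
--     counts = {}
--     for bid in optebox_ids:
--         for route in index.get(bid, ()):
--             counts[route] = counts.get(route, 0) + 1
--     # Select the first route (dict insertion order) with the strict maximum positive count.
--     best, best_count = None, 0
--     for route in route_map:
--         c = counts.get(route, 0)
--         if c > best_count:
--             best, best_count = route, c
--     if best is None: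
--         return None, set(), set(optebox_ids)
--     s = set(route_map[best])
--     return best, s - optebox_ids, optebox_ids - s
-- ===== Notes on version B (the rewrite author's own statement) =====
-- stated objective: alternative
-- what changed: B replaces A's per-route set intersections with an inverted index (box id -> routes) and a per-route tally filled by a single scan of optebox_ids through that index, then selects the first route with the strict maximum positive count and builds the two difference sets once from the winner.
import Mathlib
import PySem

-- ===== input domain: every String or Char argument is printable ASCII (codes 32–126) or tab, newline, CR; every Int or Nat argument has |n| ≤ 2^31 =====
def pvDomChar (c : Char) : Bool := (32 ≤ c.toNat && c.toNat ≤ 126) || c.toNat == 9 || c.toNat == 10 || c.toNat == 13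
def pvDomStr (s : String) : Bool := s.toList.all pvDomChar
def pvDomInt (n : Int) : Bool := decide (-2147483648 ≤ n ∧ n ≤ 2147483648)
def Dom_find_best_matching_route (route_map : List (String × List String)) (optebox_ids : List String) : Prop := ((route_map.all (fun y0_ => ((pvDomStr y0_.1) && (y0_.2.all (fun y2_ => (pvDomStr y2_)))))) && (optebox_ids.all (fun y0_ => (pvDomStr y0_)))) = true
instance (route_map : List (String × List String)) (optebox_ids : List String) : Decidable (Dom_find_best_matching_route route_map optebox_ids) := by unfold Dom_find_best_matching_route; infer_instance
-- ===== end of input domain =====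

-- B computes the match counts through an inverted index (box id -> routes containing it) filled
-- once from route_map and tallied by one scan of optebox_ids, then selects the winner and builds
-- the two difference sets once from it; objective: alternative (same asymptotic cost).

-- ===== PORT A =====
def find_best_matching_route (route_map : List (String × List String)) (optebox_ids : List String) : Option String × List String × List String :=
  let best_match : Option String := none
  let max_matches : Int := 0
  let missing_boxes : PySem.Set String := PySem.Set.empty
  let all_route_boxes : PySem.Set String := PySem.Set.empty
  let unmatched_boxes : PySem.Set String := PySem.Set.diff optebox_ids all_route_boxes
  let res := route_map.foldl (fun st p =>
    let matches_ : Int := PySem.Set.len (PySem.Set.inter (PySem.Set.ofList p.2) optebox_ids)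
    if st.2.1 < matches_ then
      (some p.1, matches_, PySem.Set.diff (PySem.Set.ofList p.2) optebox_ids,
        PySem.Set.diff optebox_ids (PySem.Set.ofList p.2))
    else st)
    (best_match, max_matches, missing_boxes, unmatched_boxes)
  (res.1, res.2.2.1, res.2.2.2)

-- ===== PORT B =====
def find_best_matching_route_alt (route_map : List (String × List String)) (optebox_ids : List String) : Option String × List String × List String :=
  -- index = {}; for route, ids in route_map.items(): for bid in set(ids): index.setdefault(bid, set()).add(route)
  let index : PySem.Dict String (PySem.Set String) :=
    route_map.foldl (fun d p =>
      (PySem.Set.ofList p.2).foldl (fun d bid =>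
        d.insert bid (PySem.Set.add (d.getD bid PySem.Set.empty) p.1)) d)
      PySem.Dict.empty
  -- counts = {}; for bid in optebox_ids: for route in index.get(bid, ()): counts[route] = counts.get(route, 0) + 1
  let counts : PySem.Dict String Int :=
    optebox_ids.foldl (fun c bid =>
      (index.getD bid PySem.Set.empty).foldl (fun c r =>
        c.insert r (c.getD r 0 + 1)) c)
      PySem.Dict.empty
  -- best, best_count = None, 0; for route in route_map: …
  let sel := route_map.foldl (fun st p =>
      let c := counts.getD p.1 0
      if st.2 < c then (some p.1, c) else st)
    ((none : Option String), (0 : Int))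
  match sel.1 with
  | none => (none, PySem.Set.empty, PySem.Set.ofList optebox_ids)
  | some r =>
    -- s = set(route_map[best]); best is a key of route_map, so the default [] is unreachable
    let s := PySem.Set.ofList ((PySem.Dict.mk route_map).getD r [])
    (some r, PySem.Set.diff s optebox_ids, PySem.Set.diff optebox_ids s)

-- ===== PRECONDITION & SPEC =====
-- route_map models a Python dict[str, list[str]] and optebox_ids a Python set[str]: Pre_ only
-- excludes association lists with duplicate keys and element lists with duplicates, which are not
-- valid representations of any dict/set input the Python A can receive.
def Pre_find_best_matching_route (route_map : List (String × List String)) (optebox_ids : List String) : Prop := optebox_ids.Nodup ∧ (route_map.map Prod.fst).Nodup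
instance (route_map : List (String × List String)) (optebox_ids : List String) : Decidable (Pre_find_best_matching_route route_map optebox_ids) := by unfold Pre_find_best_matching_route; infer_instance
def pvWitness_find_best_matching_route : (List (String × List String)) × List String := ([("r1", ["a", "b"]), ("r2", ["b", "c"])], ["b", "c", "d"])
def Spec_find_best_matching_route (route_map : List (String × List String)) (optebox_ids : List String) (out : Option String × List String × List String) : Prop := out = find_best_matching_route_alt route_map optebox_ids
instance (route_map : List (String × List String)) (optebox_ids : List String) (out : Option String × List String × List String) : Decidable (Spec_find_best_matching_route route_map optebox_ids out) := by unfold Spec_find_best_matching_route; infer_instance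

-- ===== CLAIM (what is proved, stated in full; the proofs are below) =====
def Claim_equal_find_best_matching_route : Prop := ∀ (route_map : List (String × List String)) (optebox_ids : List String), Dom_find_best_matching_route route_map optebox_ids → Pre_find_best_matching_route route_map optebox_ids → Spec_find_best_matching_route route_map optebox_ids (find_best_matching_route route_map optebox_ids)

-- ===== LEMMAS AND PROOFS =====

-- the match count of a route entry against optebox_ids
def pvF (ob : List String) (p : String × List String) : Int :=
  PySem.Set.len (PySem.Set.inter (PySem.Set.ofList p.2) ob)

-- A's loop step on its 4-tuple state
def pvStepA (ob : List String) (st : Option String × Int × List String × List String)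
    (p : String × List String) : Option String × Int × List String × List String :=
  if st.2.1 < pvF ob p then
    (some p.1, pvF ob p, PySem.Set.diff (PySem.Set.ofList p.2) ob,
      PySem.Set.diff ob (PySem.Set.ofList p.2))
  else st

-- the state A holds after an improvement by entry p
def pvG (ob : List String) (p : String × List String) : Option String × Int × List String × List String :=
  (some p.1, pvF ob p, PySem.Set.diff (PySem.Set.ofList p.2) ob, PySem.Set.diff ob (PySem.Set.ofList p.2))

-- running first-wins maximum over pairs, seeded with p
def pvMaxFrom (ob : List String) (p : String × List String) (l : List (String × List String)) : String × List String :=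
  l.foldl (fun m x => if pvF ob m < pvF ob x then x else m) p

-- B's inverted index and its builders, named for the proofs (definitionally the folds in the port)
def pvIdxStep (d : PySem.Dict String (PySem.Set String)) (p : String × List String) : PySem.Dict String (PySem.Set String) :=
  (PySem.Set.ofList p.2).foldl (fun d bid => d.insert bid (PySem.Set.add (d.getD bid PySem.Set.empty) p.1)) d

def pvIdx (rm : List (String × List String)) : PySem.Dict String (PySem.Set String) :=
  rm.foldl pvIdxStep PySem.Dict.empty

def pvCntStep (idx : PySem.Dict String (PySem.Set String)) (c : PySem.Dict String Int) (bid : String) : PySem.Dict String Int :=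
  (idx.getD bid PySem.Set.empty).foldl (fun c r => c.insert r (c.getD r 0 + 1)) c

def pvCnt (idx : PySem.Dict String (PySem.Set String)) (ob : List String) : PySem.Dict String Int :=
  ob.foldl (pvCntStep idx) PySem.Dict.empty

-- B's selection step on its pair state
def pvSelStep (cnt : PySem.Dict String Int) (st : Option String × Int) (p : String × List String) : Option String × Int :=
  if st.2 < cnt.getD p.1 0 then (some p.1, cnt.getD p.1 0) else st

lemma pvF_nonneg (ob : List String) (p : String × List String) : 0 ≤ pvF ob p := by
  simp [pvF, PySem.Set.len]

lemma pvMaxFrom_cons (ob : List String) (p x : String × List String) (l : List (String × List String)) :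
    pvMaxFrom ob p (x :: l) = pvMaxFrom ob (if pvF ob p < pvF ob x then x else p) l := rfl

lemma pvMaxFrom_mem (ob : List String) (p : String × List String) (l : List (String × List String)) :
    pvMaxFrom ob p l ∈ p :: l := by
  induction l generalizing p with
  | nil => simp [pvMaxFrom]
  | cons x r ih =>
    rw [pvMaxFrom_cons]
    split_ifs with h
    · have h1 := ih x
      simp only [List.mem_cons] at h1 ⊢
      tauto
    · have h1 := ih p
      simp only [List.mem_cons] at h1 ⊢
      tauto

lemma pvF_maxFrom_le (ob : List String) (p : String × List String) (l : List (String × List String)) :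
    pvF ob p ≤ pvF ob (pvMaxFrom ob p l) := by
  induction l generalizing p with
  | nil => simp [pvMaxFrom]
  | cons x r ih =>
    rw [pvMaxFrom_cons]
    split_ifs with h
    · exact le_of_lt (lt_of_lt_of_le h (ih x))
    · exact ih p

lemma pvLoop_pos (ob : List String) (l : List (String × List String)) (p : String × List String)
    (hp : 0 < pvF ob p) :
    l.foldl (pvStepA ob) (pvG ob p) = pvG ob (pvMaxFrom ob p l) := by
  induction l generalizing p with
  | nil => rfl
  | cons x r ih =>
    rw [List.foldl_cons, pvMaxFrom_cons]
    by_cases h : pvF ob p < pvF ob x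
    · rw [show pvStepA ob (pvG ob p) x = pvG ob x from by simp [pvStepA, pvG, h], if_pos h]
      exact ih x (lt_trans hp h)
    · rw [show pvStepA ob (pvG ob p) x = pvG ob p from by simp [pvStepA, pvG, h], if_neg h]
      exact ih p hp

lemma pvLoop_zero (ob : List String) (l : List (String × List String)) (p : String × List String)
    (hp : pvF ob p = 0) (init : Option String × Int × List String × List String)
    (hi : init.2.1 = 0) :
    l.foldl (pvStepA ob) init =
      (if pvF ob (pvMaxFrom ob p l) = 0 then init else pvG ob (pvMaxFrom ob p l)) := by
  induction l generalizing p with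
  | nil => simp [pvMaxFrom, hp]
  | cons x r ih =>
    rw [List.foldl_cons, pvMaxFrom_cons]
    by_cases hx : pvF ob x = 0
    · have hstep : pvStepA ob init x = init := by simp [pvStepA, hi, hx]
      have hmf : (if pvF ob p < pvF ob x then x else p) = p := by simp [hp, hx]
      rw [hstep, hmf]; exact ih p hp
    · have hxpos : 0 < pvF ob x := lt_of_le_of_ne (pvF_nonneg ob x) (Ne.symm hx)
      have hstep : pvStepA ob init x = pvG ob x := by simp [pvStepA, pvG, hi, hxpos]
      have hmf : (if pvF ob p < pvF ob x then x else p) = x := by simp [hp, hxpos]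
      rw [hstep, hmf, pvLoop_pos ob r x hxpos]
      have hpos : 0 < pvF ob (pvMaxFrom ob x r) := lt_of_lt_of_le hxpos (pvF_maxFrom_le ob x r)
      rw [if_neg (by omega)]

-- B's selection loop, same characterisation on its pair state
lemma pvSelLoop_pos (ob : List String) (cnt : PySem.Dict String Int)
    (l : List (String × List String)) (p : String × List String)
    (hc : ∀ x ∈ l, cnt.getD x.1 0 = pvF ob x) (hpv : cnt.getD p.1 0 = pvF ob p)
    (hp : 0 < pvF ob p) :
    l.foldl (pvSelStep cnt) (some p.1, pvF ob p) = (some (pvMaxFrom ob p l).1, pvF ob (pvMaxFrom ob p l)) := by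
  induction l generalizing p with
  | nil => rfl
  | cons x r ih =>
    rw [List.foldl_cons, pvMaxFrom_cons]
    have hx : cnt.getD x.1 0 = pvF ob x := hc x (by simp)
    by_cases h : pvF ob p < pvF ob x
    · rw [show pvSelStep cnt (some p.1, pvF ob p) x = (some x.1, pvF ob x) from by
        simp [pvSelStep, hx, h], if_pos h]
      exact ih x (fun y hy => hc y (by simp [hy])) hx (lt_trans hp h)
    · rw [show pvSelStep cnt (some p.1, pvF ob p) x = (some p.1, pvF ob p) from by
        simp [pvSelStep, hx, h], if_neg h]
      exact ih p (fun y hy => hc y (by simp [hy])) hpv hp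

lemma pvSelLoop_zero (ob : List String) (cnt : PySem.Dict String Int)
    (l : List (String × List String)) (p : String × List String)
    (hc : ∀ x ∈ l, cnt.getD x.1 0 = pvF ob x)
    (hp : pvF ob p = 0) (init : Option String × Int) (hi : init.2 = 0) :
    l.foldl (pvSelStep cnt) init =
      (if pvF ob (pvMaxFrom ob p l) = 0 then init
       else (some (pvMaxFrom ob p l).1, pvF ob (pvMaxFrom ob p l))) := by
  induction l generalizing p with
  | nil => simp [pvMaxFrom, hp]
  | cons x r ih =>
    rw [List.foldl_cons, pvMaxFrom_cons]
    have hx : cnt.getD x.1 0 = pvF ob x := hc x (by simp)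
    by_cases hx0 : pvF ob x = 0
    · have hstep : pvSelStep cnt init x = init := by simp [pvSelStep, hx, hi, hx0]
      have hmf : (if pvF ob p < pvF ob x then x else p) = p := by simp [hp, hx0]
      rw [hstep, hmf]; exact ih p (fun y hy => hc y (by simp [hy])) hp
    · have hxpos : 0 < pvF ob x := lt_of_le_of_ne (pvF_nonneg ob x) (Ne.symm hx0)
      have hstep : pvSelStep cnt init x = (some x.1, pvF ob x) := by
        simp [pvSelStep, hx, hi, hxpos]
      have hmf : (if pvF ob p < pvF ob x then x else p) = x := by simp [hp, hxpos]
      rw [hstep, hmf, pvSelLoop_pos ob cnt r x (fun y hy => hc y (by simp [hy])) hx hxpos]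
      have hpos : 0 < pvF ob (pvMaxFrom ob x r) := lt_of_lt_of_le hxpos (pvF_maxFrom_le ob x r)
      rw [if_neg (by omega)]

-- inner index loop: membership in the stored route-set
lemma pvIdxInner_mem (r : String) (l : List String) (d : PySem.Dict String (PySem.Set String))
    (k r' : String) :
    r' ∈ (l.foldl (fun d bid => d.insert bid (PySem.Set.add (d.getD bid PySem.Set.empty) r)) d).getD k PySem.Set.empty ↔
      r' ∈ d.getD k PySem.Set.empty ∨ (k ∈ l ∧ r' = r) := by
  induction l generalizing d with
  | nil => simp
  | cons b t ih =>
    rw [List.foldl_cons, ih]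
    rw [PySem.Dict.getD_insert]
    by_cases hk : k = b
    · subst hk
      rw [if_pos rfl]
      simp only [PySem.Set.mem_add, List.mem_cons]
      tauto
    · simp only [if_neg hk, List.mem_cons]
      tauto

-- inner index loop: the stored route-sets stay duplicate-free
lemma pvIdxInner_nodup (r : String) (l : List String) (d : PySem.Dict String (PySem.Set String))
    (hd : ∀ k, ((d.getD k PySem.Set.empty : PySem.Set String)).Nodup) (k : String) :
    ((l.foldl (fun d bid => d.insert bid (PySem.Set.add (d.getD bid PySem.Set.empty) r)) d).getD k PySem.Set.empty).Nodup := by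
  induction l generalizing d with
  | nil => exact hd k
  | cons b t ih =>
    rw [List.foldl_cons]
    refine ih _ (fun k' => ?_)
    rw [PySem.Dict.getD_insert]
    split_ifs with h
    · exact PySem.Set.nodup_add _ _ (hd b)
    · exact hd k'

lemma pvIdx_mem (rm : List (String × List String)) (bid r : String) :
    r ∈ (pvIdx rm).getD bid PySem.Set.empty ↔ ∃ ids, (r, ids) ∈ rm ∧ bid ∈ ids := by
  suffices h : ∀ (rm : List (String × List String)) (d : PySem.Dict String (PySem.Set String)),
      r ∈ (rm.foldl pvIdxStep d).getD bid PySem.Set.empty ↔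
        r ∈ d.getD bid PySem.Set.empty ∨ ∃ ids, (r, ids) ∈ rm ∧ bid ∈ ids by
    rw [pvIdx, h]; simp [PySem.Set.empty]
  intro rm d
  induction rm generalizing d with
  | nil => simp
  | cons p t ih =>
    obtain ⟨p1, p2⟩ := p
    rw [List.foldl_cons, ih, pvIdxStep, pvIdxInner_mem]
    simp only [PySem.Set.mem_ofList, List.mem_cons, Prod.mk.injEq]
    constructor
    · rintro ((h | ⟨h1, h2⟩) | ⟨ids, h1, h2⟩)
      · exact Or.inl h
      · exact Or.inr ⟨p2, Or.inl ⟨h2, rfl⟩, h1⟩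
      · exact Or.inr ⟨ids, Or.inr h1, h2⟩
    · rintro (h | ⟨ids, ⟨he1, he2⟩ | h1, h2⟩)
      · exact Or.inl (Or.inl h)
      · subst he1; subst he2; exact Or.inl (Or.inr ⟨h2, rfl⟩)
      · exact Or.inr ⟨ids, h1, h2⟩

lemma pvIdx_nodup (rm : List (String × List String)) (bid : String) :
    ((pvIdx rm).getD bid PySem.Set.empty : PySem.Set String).Nodup := by
  suffices h : ∀ (rm : List (String × List String)) (d : PySem.Dict String (PySem.Set String)),
      (∀ k, ((d.getD k PySem.Set.empty : PySem.Set String)).Nodup) →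
      ∀ k, ((rm.foldl pvIdxStep d).getD k PySem.Set.empty).Nodup by
    exact h rm PySem.Dict.empty (fun k => by simp [PySem.Set.empty]) bid
  intro rm
  induction rm with
  | nil => intro d hd k; exact hd k
  | cons p t ih =>
    intro d hd k
    rw [List.foldl_cons]
    exact ih _ (pvIdxInner_nodup p.1 _ d hd) k

-- the tally: counts.get(r, 0) is the sum over optebox_ids of the index indicator
lemma pvCnt_getD (idx : PySem.Dict String (PySem.Set String)) (ob : List String) (r : String) :
    (pvCnt idx ob).getD r 0 =
      (ob.map (fun bid => ((((idx.getD bid PySem.Set.empty : PySem.Set String).count r : Nat)) : Int))).sum := by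
  suffices h : ∀ (ob : List String) (c : PySem.Dict String Int),
      (ob.foldl (pvCntStep idx) c).getD r 0 =
        c.getD r 0 + (ob.map (fun bid => (((idx.getD bid PySem.Set.empty : PySem.Set String).count r : Nat) : Int))).sum by
    rw [pvCnt, h]; simp
  intro ob
  induction ob with
  | nil => simp
  | cons b t ih =>
    intro c
    rw [List.foldl_cons, ih, pvCntStep, PySem.Dict.getD_foldl_insert_add_one]
    simp; ring

-- with unique route keys, an entry's list is determined by its key
lemma pvKeyUniq (rm : List (String × List String)) (hk : (rm.map Prod.fst).Nodup)
    {r : String} {v w : List String} (hv : (r, v) ∈ rm) (hw : (r, w) ∈ rm) : v = w := by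
  induction rm with
  | nil => simp at hv
  | cons p t ih =>
    simp only [List.map_cons, List.nodup_cons] at hk
    rcases List.mem_cons.1 hv with h1 | h1 <;> rcases List.mem_cons.1 hw with h2 | h2
    · rw [← h2] at h1; injection h1
    · exfalso; apply hk.1; rw [← h1]
      exact List.mem_map.2 ⟨(r, w), h2, rfl⟩
    · exfalso; apply hk.1; rw [← h2]
      exact List.mem_map.2 ⟨(r, v), h1, rfl⟩
    · exact ih hk.2 h1 h2

-- a nodup scan of ob against ids counts the same intersection as A's set intersection
lemma pvCount_inter (ids ob : List String) (hob : ob.Nodup) :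
    ((ob.countP (fun bid => decide (bid ∈ ids)) : Nat) : Int) = pvF ob (("", ids) : String × List String) := by
  have hperm : (ob.filter (fun bid => decide (bid ∈ ids))).Perm
      (PySem.Set.inter (PySem.Set.ofList ids) ob) := by
    apply (List.perm_ext_iff_of_nodup (hob.filter _) (PySem.Set.nodup_inter _ _ (PySem.Set.nodup_ofList ids))).2
    intro y
    rw [List.mem_filter, PySem.Set.mem_inter, PySem.Set.mem_ofList]
    simp; tauto
  rw [pvF]
  simp [PySem.Set.len, List.countP_eq_length_filter, hperm.length_eq]

-- counts.get(route, 0) = len(set(ids) & optebox_ids) for every entry (route, ids) of route_map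
lemma pvCnt_eq_pvF (rm : List (String × List String)) (ob : List String)
    (hk : (rm.map Prod.fst).Nodup) (hob : ob.Nodup)
    (p : String × List String) (hp : p ∈ rm) :
    (pvCnt (pvIdx rm) ob).getD p.1 0 = pvF ob p := by
  rw [pvCnt_getD]
  have hmem : ∀ bid, p.1 ∈ ((pvIdx rm).getD bid PySem.Set.empty : PySem.Set String) ↔ bid ∈ p.2 := by
    intro bid
    rw [pvIdx_mem]
    constructor
    · rintro ⟨ids, h1, h2⟩
      have he : ids = p.2 := pvKeyUniq rm hk h1 hp
      rwa [he] at h2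
    · intro h; exact ⟨p.2, hp, h⟩
  have hcount : ∀ bid, (((pvIdx rm).getD bid PySem.Set.empty : PySem.Set String).count p.1 : Int)
      = if bid ∈ p.2 then (1 : Int) else 0 := by
    intro bid
    by_cases h : bid ∈ p.2
    · rw [if_pos h]
      have := List.count_eq_one_of_mem (pvIdx_nodup rm bid) ((hmem bid).2 h)
      exact_mod_cast this
    · rw [if_neg h]
      have := List.count_eq_zero_of_not_mem (fun hc => h ((hmem bid).1 hc))
      exact_mod_cast this
  rw [List.map_congr_left (fun bid _ => hcount bid)]
  have : (ob.map (fun bid => if bid ∈ p.2 then (1 : Int) else 0)).sum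
      = ((ob.countP (fun bid => decide (bid ∈ p.2)) : Nat) : Int) := by
    rw [show (fun bid => if bid ∈ p.2 then (1 : Int) else 0)
        = (fun bid => if (fun b => decide (b ∈ p.2)) bid = true then (1 : Int) else 0) from by
      funext bid; simp]
    exact PySem.List.sum_map_ite_one_zero _ ob
  rw [this, pvCount_inter p.2 ob hob]
  simp [pvF]

-- the winner's ids come back out of the dict lookup
lemma pvLookup (rm : List (String × List String)) (hk : (rm.map Prod.fst).Nodup)
    (p : String × List String) (hp : p ∈ rm) :
    (PySem.Dict.mk rm).getD p.1 [] = p.2 := by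
  apply PySem.Dict.getD_of_mem_items
  · exact hp
  · simpa [PySem.Dict.keys] using hk

lemma pvPortA_eq (route_map : List (String × List String)) (ob : List String) :
    find_best_matching_route route_map ob =
      (let res := route_map.foldl (pvStepA ob)
        (none, (0 : Int), PySem.Set.empty, PySem.Set.diff ob PySem.Set.empty);
       (res.1, res.2.2.1, res.2.2.2)) := rfl

lemma pvPortB_eq (route_map : List (String × List String)) (ob : List String) :
    find_best_matching_route_alt route_map ob =
      (let sel := route_map.foldl (pvSelStep (pvCnt (pvIdx route_map) ob)) ((none : Option String), (0 : Int));
       match sel.1 with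
       | none => (none, PySem.Set.empty, PySem.Set.ofList ob)
       | some r =>
         let s := PySem.Set.ofList ((PySem.Dict.mk route_map).getD r [])
         (some r, PySem.Set.diff s ob, PySem.Set.diff ob s)) := rfl

-- ===== VERDICT (by name: the statement is the Claim_ definition above) =====
theorem find_best_matching_route_spec : Claim_equal_find_best_matching_route := by
  intro route_map ob _ hpre
  obtain ⟨hob, hk⟩ := hpre
  unfold Spec_find_best_matching_route
  rw [pvPortA_eq, pvPortB_eq]
  have hc : ∀ x ∈ route_map, (pvCnt (pvIdx route_map) ob).getD x.1 0 = pvF ob x :=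
    fun x hx => pvCnt_eq_pvF route_map ob hk hob x hx
  have hobs : PySem.Set.ofList ob = ob := PySem.Set.ofList_eq_self_of_nodup ob hob
  have hdiff : PySem.Set.diff ob ([] : List String) = ob := by
    show List.filter _ ob = ob
    simp
  cases route_map with
  | nil => simp [hobs, hdiff, PySem.Set.empty]
  | cons x t =>
    simp only [List.foldl_cons]
    have hx : (pvCnt (pvIdx (x :: t)) ob).getD x.1 0 = pvF ob x := hc x (by simp)
    have hct : ∀ y ∈ t, (pvCnt (pvIdx (x :: t)) ob).getD y.1 0 = pvF ob y :=
      fun y hy => hc y (by simp [hy])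
    by_cases hx0 : pvF ob x = 0
    · have hstepA : pvStepA ob (none, (0 : Int), PySem.Set.empty, PySem.Set.diff ob PySem.Set.empty) x
          = (none, (0 : Int), PySem.Set.empty, PySem.Set.diff ob PySem.Set.empty) := by
        simp [pvStepA, hx0]
      have hstepB : pvSelStep (pvCnt (pvIdx (x :: t)) ob) ((none : Option String), (0 : Int)) x
          = ((none : Option String), (0 : Int)) := by
        simp [pvSelStep, hx, hx0]
      rw [hstepA, hstepB, pvLoop_zero ob t x hx0 _ rfl, pvSelLoop_zero ob _ t x hct hx0 _ rfl]
      by_cases hm : pvF ob (pvMaxFrom ob x t) = 0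
      · rw [if_pos hm, if_pos hm]
        simp [hobs, hdiff, PySem.Set.empty]
      · rw [if_neg hm, if_neg hm]
        simp only [pvG]
        have hmm : pvMaxFrom ob x t ∈ x :: t := pvMaxFrom_mem ob x t
        rw [pvLookup (x :: t) hk (pvMaxFrom ob x t) hmm]
    · have hxpos : 0 < pvF ob x := lt_of_le_of_ne (pvF_nonneg ob x) (Ne.symm hx0)
      have hstepA : pvStepA ob (none, (0 : Int), PySem.Set.empty, PySem.Set.diff ob PySem.Set.empty) x
          = pvG ob x := by
        simp [pvStepA, pvG, hxpos]
      have hstepB : pvSelStep (pvCnt (pvIdx (x :: t)) ob) ((none : Option String), (0 : Int)) x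
          = (some x.1, pvF ob x) := by
        simp [pvSelStep, hx, hxpos]
      rw [hstepA, hstepB, pvLoop_pos ob t x hxpos, pvSelLoop_pos ob _ t x hct hx hxpos]
      simp only [pvG]
      have hmm : pvMaxFrom ob x t ∈ x :: t := pvMaxFrom_mem ob x t
      rw [pvLookup (x :: t) hk (pvMaxFrom ob x t) hmm]
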